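-- pv_equiv track=rewrite | github.com/scorixear/AdventOfCode | 2023/13/2.py | find_horizontal_reflection
-- ===== SOURCE A (Python) =====
-- def find_horizontal_reflection(grid, horizontal):
--     # for each possible horizontal reflection
--     for i in range(1, len(grid)):
--         is_match = True
--         # for each side of the reflection
--         # starting at (i-1, i)
--         for j in range(1,i+1):
--             # if we reached the end of the grid, break
--             if i+j-1 >= len(grid):
--                 break
--             # if the sides don't match, break
--             # i+j-1 is the right side, starting from i
--             # i-j is the left side, starting from i-1
--             if grid[i+j-1] != grid[i-j]:
--                 is_match = False
--                 break
--         # if all lines matched or we broke early due to reaching the right edge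
--         # and this is not the same reflection as the one we found in part 1
--         if is_match and i != horizontal:
--             # return the index of the reflection (the first index right of the reflection)
--             return i
--     return 0
-- ===== SOURCE B (Python) =====
-- def find_horizontal_reflection(grid, horizontal):
--     n = len(grid)
--     for i in range(1, n):
--         if i != horizontal and grid[i - 1] == grid[i]:
--             k = min(i, n - i)
--             if grid[i - k:i][::-1] == grid[i:i + k]:
--                 return i
--     return 0
-- ===== Notes on version B (the rewrite author's own statement) =====
-- stated objective: alternative
-- what changed: A's hand-written inner index-by-index mirror loop with break flags is replaced by an adjacent-row candidate filter (grid[i-1] == grid[i]) followed by a single reversed-slice comparison grid[i-k:i][::-1] == grid[i:i+k] with k = min(i, n-i).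
import Mathlib
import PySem

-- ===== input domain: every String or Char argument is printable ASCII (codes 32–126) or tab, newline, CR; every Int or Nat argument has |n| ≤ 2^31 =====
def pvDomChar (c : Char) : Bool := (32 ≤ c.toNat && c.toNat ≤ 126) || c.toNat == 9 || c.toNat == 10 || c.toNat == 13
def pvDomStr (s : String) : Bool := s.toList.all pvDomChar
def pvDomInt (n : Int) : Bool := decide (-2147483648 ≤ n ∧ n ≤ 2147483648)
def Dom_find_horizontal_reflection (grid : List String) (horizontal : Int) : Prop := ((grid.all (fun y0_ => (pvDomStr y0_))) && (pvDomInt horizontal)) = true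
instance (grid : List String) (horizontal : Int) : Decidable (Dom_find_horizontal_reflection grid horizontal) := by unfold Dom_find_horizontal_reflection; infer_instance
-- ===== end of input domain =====

-- B replaces A's hand-written inner index-by-index mirror loop by an adjacent-row
-- candidate filter followed by one reversed-slice comparison grid[i-k:i][::-1] == grid[i:i+k].

-- ===== PORT A =====
-- inner loop 'for j in range(1, i+1)': is_match accumulator with the two break conditions.
-- Python indices i+j-1 and i-j are nonnegative and (under the guards) in range, so
-- List.getD is exact there.
def pvAInner (grid : List String) (i : Nat) (j : Nat) : Bool :=
  if j > i then true                                   -- range exhausted: is_match stays True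
  else if i + j - 1 ≥ grid.length then true            -- 'break' with is_match = True
  else if grid.getD (i + j - 1) "" ≠ grid.getD (i - j) "" then false
  else pvAInner grid i (j + 1)
termination_by i + 1 - j
decreasing_by omega

-- outer loop 'for i in range(1, len(grid))' with early return, else 'return 0'
def pvAOuter (grid : List String) (horizontal : Int) (i : Nat) : Int :=
  if i < grid.length then
    if pvAInner grid i 1 ∧ (i : Int) ≠ horizontal then (i : Int)
    else pvAOuter grid horizontal (i + 1)
  else 0
termination_by grid.length - i
decreasing_by omega

def find_horizontal_reflection (grid : List String) (horizontal : Int) : Int :=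
  pvAOuter grid horizontal 1

-- ===== PORT B =====
-- Source B: candidate filter grid[i-1] == grid[i] (indices in range under 1 ≤ i < n, so
-- List.getD is exact), then k = min(i, n-i) and one reversed-slice comparison
-- grid[i-k:i][::-1] == grid[i:i+k] ([::-1] is List.reverse, exact).
def pvBOuter (grid : List String) (horizontal : Int) (i : Nat) : Int :=
  if i < grid.length then
    if (i : Int) ≠ horizontal ∧ grid.getD (i - 1) "" = grid.getD i "" then
      let k := min i (grid.length - i)
      if (PySem.List.slice grid (some ((i - k : Nat) : Int)) (some ((i : Nat) : Int))).reverse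
          = PySem.List.slice grid (some ((i : Nat) : Int)) (some ((i + k : Nat) : Int)) then
        (i : Int)
      else pvBOuter grid horizontal (i + 1)
    else pvBOuter grid horizontal (i + 1)
  else 0
termination_by grid.length - i
decreasing_by all_goals omega

def find_horizontal_reflection_alt (grid : List String) (horizontal : Int) : Int :=
  pvBOuter grid horizontal 1

-- ===== PRECONDITION & SPEC =====
def Spec_find_horizontal_reflection (grid : List String) (horizontal : Int) (out : Int) : Prop := out = find_horizontal_reflection_alt grid horizontal
instance (grid : List String) (horizontal : Int) (out : Int) : Decidable (Spec_find_horizontal_reflection grid horizontal out) := by unfold Spec_find_horizontal_reflection; infer_instance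

-- ===== CLAIM (what is proved, stated in full; the proofs are below) =====
def Claim_equal_find_horizontal_reflection : Prop := ∀ (grid : List String) (horizontal : Int), Dom_find_horizontal_reflection grid horizontal → Spec_find_horizontal_reflection grid horizontal (find_horizontal_reflection grid horizontal)

-- ===== LEMMAS AND PROOFS =====

-- A's inner loop is the pointwise mirror test for j in [j0, min i (n-i)]
lemma innerA_iff (grid : List String) (i : Nat) (hi : i < grid.length) :
    ∀ d j, 1 ≤ j → i + 1 - j ≤ d →
      (pvAInner grid i j = true ↔
        ∀ m, j ≤ m → m ≤ min i (grid.length - i) →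
          grid.getD (i + m - 1) "" = grid.getD (i - m) "") := by
  intro d
  induction d with
  | zero =>
    intro j hj hd
    rw [pvAInner]
    have hji : j > i := by omega
    simp [hji]
    intro m hm hm2
    omega
  | succ d ih =>
    intro j hj hd
    rw [pvAInner]
    by_cases hji : j > i
    · simp [hji]
      intro m hm hm2
      omega
    · simp only [hji, if_false]
      by_cases hedge : i + j - 1 ≥ grid.length
      · simp [hedge]
        intro m hm hm2
        omega
      · simp only [hedge, if_false]
        by_cases hne : grid.getD (i + j - 1) "" ≠ grid.getD (i - j) ""
        · rw [if_pos hne]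
          constructor
          · intro h; cases h
          · intro h
            exact absurd (h j le_rfl (by omega)) hne
        · rw [if_neg hne]
          push Not at hne
          rw [ih (j + 1) (by omega) (by omega)]
          constructor
          · intro h m hm hm2
            rcases Nat.eq_or_lt_of_le hm with rfl | hlt
            · exact hne
            · exact h m hlt hm2
          · intro h m hm hm2
            exact h m (by omega) hm2

-- B's reversed-slice comparison is the same pointwise mirror test
lemma sliceB_iff (grid : List String) (i : Nat) (hi : i < grid.length) (h1 : 1 ≤ i) :
    ((PySem.List.slice grid (some ((i - min i (grid.length - i) : Nat) : Int)) (some ((i : Nat) : Int))).reverse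
        = PySem.List.slice grid (some ((i : Nat) : Int)) (some ((i + min i (grid.length - i) : Nat) : Int)))
      ↔ ∀ m, 1 ≤ m → m ≤ min i (grid.length - i) →
          grid.getD (i + m - 1) "" = grid.getD (i - m) "" := by
  set n := grid.length with hn
  set k := min i (n - i) with hk
  have hki : k ≤ i := Nat.min_le_left _ _
  have hkn : k ≤ n - i := Nat.min_le_right _ _
  rw [PySem.List.slice_natCast, PySem.List.slice_natCast]
  have hL1 : ((grid.drop (i - k)).take (i - (i - k))).length = k := by
    simp [List.length_take, List.length_drop]
    omega
  have hL2 : ((grid.drop i).take (i + k - i)).length = k := by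
    simp [List.length_take, List.length_drop]
    omega
  constructor
  · intro h m hm1 hm2
    have hlt : m - 1 < ((grid.drop (i - k)).take (i - (i - k))).reverse.length := by
      rw [List.length_reverse, hL1]; omega
    have hv := List.getElem_of_eq h hlt
    rw [List.getElem_reverse] at hv
    rw [List.getElem_take, List.getElem_take] at hv
    rw [List.getElem_drop, List.getElem_drop] at hv
    simp only [hL1] at hv
    rw [List.getD_eq_getElem grid "" (by omega : i + m - 1 < grid.length),
        List.getD_eq_getElem grid "" (by omega : i - m < grid.length)]
    simp only [show i - k + (k - 1 - (m - 1)) = i - m from by omega,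
               show i + (m - 1) = i + m - 1 from by omega] at hv
    exact hv.symm
  · intro h
    apply List.ext_getElem
    · rw [List.length_reverse, hL1, hL2]
    · intro m hm hm2
      rw [List.length_reverse, hL1] at hm
      rw [List.getElem_reverse]
      rw [List.getElem_take, List.getElem_take]
      rw [List.getElem_drop, List.getElem_drop]
      simp only [hL1]
      have hv := h (m + 1) (by omega) (by omega)
      rw [List.getD_eq_getElem grid "" (by omega : i + (m + 1) - 1 < grid.length),
          List.getD_eq_getElem grid "" (by omega : i - (m + 1) < grid.length)] at hv
      simp only [show i - k + (k - 1 - m) = i - (m + 1) from by omega,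
                 show i + m = i + (m + 1) - 1 from by omega]
      exact hv.symm

lemma outer_eq (grid : List String) (horizontal : Int) :
    ∀ d i, 1 ≤ i → grid.length - i ≤ d →
      pvAOuter grid horizontal i = pvBOuter grid horizontal i := by
  intro d
  induction d with
  | zero =>
    intro i h1 hd
    rw [pvAOuter, pvBOuter]
    have : ¬ i < grid.length := by omega
    simp [this]
  | succ d ih =>
    intro i h1 hd
    rw [pvAOuter, pvBOuter]
    by_cases hi : i < grid.length
    · simp only [hi, if_true]
      have hP := innerA_iff grid i hi (i + 1 - 1) 1 le_rfl le_rfl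
      have hS := sliceB_iff grid i hi h1
      have hcand : (PySem.List.slice grid (some ((i - min i (grid.length - i) : Nat) : Int)) (some ((i : Nat) : Int))).reverse
            = PySem.List.slice grid (some ((i : Nat) : Int)) (some ((i + min i (grid.length - i) : Nat) : Int)) →
          grid.getD (i - 1) "" = grid.getD i "" := by
        intro h
        have := (hS.mp h) 1 le_rfl (by omega)
        simpa using this.symm
      by_cases hc : pvAInner grid i 1 = true ∧ (i : Int) ≠ horizontal
      · have hslice := hS.mpr (hP.mp hc.1)
        rw [if_pos hc, if_pos ⟨hc.2, hcand hslice⟩, if_pos hslice]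
      · rw [if_neg hc]
        by_cases ho : (i : Int) ≠ horizontal ∧ grid.getD (i - 1) "" = grid.getD i ""
        · rw [if_pos ho]
          have hns : ¬ (PySem.List.slice grid (some ((i - min i (grid.length - i) : Nat) : Int)) (some ((i : Nat) : Int))).reverse
              = PySem.List.slice grid (some ((i : Nat) : Int)) (some ((i + min i (grid.length - i) : Nat) : Int)) := by
            intro h
            exact hc ⟨hP.mpr (hS.mp h), ho.1⟩
          rw [if_neg hns]
          exact ih (i + 1) (by omega) (by omega)
        · rw [if_neg ho]
          exact ih (i + 1) (by omega) (by omega)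
    · simp [hi]

-- ===== VERDICT (by name: the statement is the Claim_ definition above) =====
theorem find_horizontal_reflection_spec : Claim_equal_find_horizontal_reflection := by
  intro grid horizontal _
  unfold Spec_find_horizontal_reflection find_horizontal_reflection find_horizontal_reflection_alt
  exact outer_eq grid horizontal (grid.length - 1) 1 le_rfl le_rfl
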